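-- pv_equiv track=rewrite | github.com/SestrenExsis/CodeKatas | adventofcode/AdventOfCode2023.py | get_patterns
-- ===== SOURCE A (Python) =====
-- from typing import Dict, List, Set, Tuple
--
-- def get_patterns(raw_input_lines: List[str]):
--     patterns = []
--     pattern = set()
--     row = 0
--     cols = len(raw_input_lines[0])
--     for raw_input_line in raw_input_lines:
--         if len(raw_input_line) < 1:
--             patterns.append((pattern, row, cols))
--             pattern = set()
--             row = 0
--         else:
--             for col, char in enumerate(raw_input_line):
--                 if char == '#':
--                     pattern.add((row, col))
--             cols = len(raw_input_line)
--             row += 1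
--     patterns.append((pattern, row, cols))
--     result = patterns
--     return result
-- ===== SOURCE B (Python) =====
-- def get_patterns(raw_input_lines):
--     # First pass: split lines into blocks on blank lines (keeping empty blocks,
--     # with a final block after the loop). Second pass: one tuple per block.
--     blocks = []
--     current = []
--     for line in raw_input_lines:
--         if line:
--             current.append(line)
--         else:
--             blocks.append(current)
--             current = []
--     blocks.append(current)
--     result = []
--     cols = len(raw_input_lines[0])  # raises IndexError on empty input, like the original
--     for block in blocks:
--         if block:
--             cols = len(block[-1])
--         pattern = {
--             (r, c)
--             for r, line in enumerate(block)
--             for c, ch in enumerate(line)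
--             if ch == '#'
--         }
--         result.append((pattern, len(block), cols))
--     return result
-- ===== Notes on version B (the rewrite author's own statement) =====
-- stated objective: alternative
-- what changed: Single interleaved loop with mutable set/row/cols state replaced by a two-phase pipeline: split the lines into blocks on blank delimiters, then build each block's pattern with a set comprehension and derive row/cols from the block itself.
import Mathlib
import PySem

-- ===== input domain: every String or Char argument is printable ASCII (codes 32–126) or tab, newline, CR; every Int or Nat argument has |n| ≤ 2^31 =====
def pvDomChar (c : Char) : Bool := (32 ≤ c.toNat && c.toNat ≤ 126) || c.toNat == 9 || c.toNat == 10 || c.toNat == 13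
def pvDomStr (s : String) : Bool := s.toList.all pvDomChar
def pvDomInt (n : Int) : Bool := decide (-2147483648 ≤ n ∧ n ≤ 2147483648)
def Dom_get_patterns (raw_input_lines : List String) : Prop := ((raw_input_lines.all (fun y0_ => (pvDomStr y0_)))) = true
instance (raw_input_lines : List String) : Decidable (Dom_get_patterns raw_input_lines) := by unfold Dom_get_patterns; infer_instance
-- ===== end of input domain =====

-- B restructures A's single interleaved loop into a split-into-blocks pass followed by a
-- per-block comprehension pass; same result, no speed claim.

-- ===== PORT A =====
-- loop body of A's single pass; state = (patterns, pattern, row, cols)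
def gpStepA (st : (List ((List (Int × Int)) × Int × Int)) × (PySem.Set (Int × Int)) × Int × Int)
    (line : String) : (List ((List (Int × Int)) × Int × Int)) × (PySem.Set (Int × Int)) × Int × Int :=
  let (patterns, pattern, row, cols) := st
  if PySem.Str.len line < 1 then
    (patterns ++ [(pattern, row, cols)], PySem.Set.empty, 0, cols)
  else
    let pattern' := (PySem.List.enumerate line.toList 0).foldl
      (fun pat cc => if cc.2 = '#' then PySem.Set.add pat (row, cc.1) else pat) pattern
    (patterns, pattern', row + 1, PySem.Str.len line)

def get_patterns (raw_input_lines : List String) : List ((List (Int × Int)) × Int × Int) :=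
  -- len(raw_input_lines[0]) raises IndexError on []; Pre_ excludes that input
  let cols0 : Int := PySem.Str.len (raw_input_lines.headD "")
  let st := raw_input_lines.foldl gpStepA ([], PySem.Set.empty, 0, cols0)
  st.1 ++ [(st.2.1, st.2.2.1, st.2.2.2)]

-- ===== PORT B =====
-- first pass of Source B: split into blocks on blank lines; state = (blocks, current)
def gpSplitStep (st : List (List String) × List String) (line : String) :
    List (List String) × List String :=
  if line = "" then (st.1 ++ [st.2], []) else (st.1, st.2 ++ [line])

-- the set comprehension of Source B, as the generated pair list
def gpPairs (block : List String) : List (Int × Int) :=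
  (PySem.List.enumerate block 0).flatMap (fun rl =>
    (PySem.List.enumerate rl.2.toList 0).filterMap (fun cc =>
      if cc.2 = '#' then some (rl.1, cc.1) else none))

-- second pass of Source B: one tuple per block; state = (result, cols)
def gpProcStep (acc : (List ((List (Int × Int)) × Int × Int)) × Int) (block : List String) :
    (List ((List (Int × Int)) × Int × Int)) × Int :=
  let cols := if block = [] then acc.2 else PySem.Str.len (block.getLastD "")
  (acc.1 ++ [(PySem.Set.ofList (gpPairs block), (block.length : Int), cols)], cols)

def get_patterns_alt (raw_input_lines : List String) : List ((List (Int × Int)) × Int × Int) :=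
  let sp := raw_input_lines.foldl gpSplitStep ([], [])
  let blocks := sp.1 ++ [sp.2]
  -- len(raw_input_lines[0]) raises IndexError on []; Pre_ excludes that input
  let cols0 : Int := PySem.Str.len (raw_input_lines.headD "")
  (blocks.foldl gpProcStep ([], cols0)).1

-- ===== PRECONDITION & SPEC =====
-- Pre_ excludes only the empty list, on which both A and B raise IndexError (raw_input_lines[0]).
def Pre_get_patterns (raw_input_lines : List String) : Prop := raw_input_lines ≠ []
instance (raw_input_lines : List String) : Decidable (Pre_get_patterns raw_input_lines) := by
  unfold Pre_get_patterns; infer_instance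

def pvWitness_get_patterns : List String := ["#.", "", ".#"]

def Spec_get_patterns (raw_input_lines : List String) (out : List ((List (Int × Int)) × Int × Int)) : Prop := out = get_patterns_alt raw_input_lines
instance (raw_input_lines : List String) (out : List ((List (Int × Int)) × Int × Int)) : Decidable (Spec_get_patterns raw_input_lines out) := by unfold Spec_get_patterns; infer_instance

-- ===== CLAIM (what is proved, stated in full; the proofs are below) =====
def Claim_equal_get_patterns : Prop := ∀ (raw_input_lines : List String), Dom_get_patterns raw_input_lines → Pre_get_patterns raw_input_lines → Spec_get_patterns raw_input_lines (get_patterns raw_input_lines)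

-- ===== LEMMAS AND PROOFS =====

-- `cols` that B computes for a block, given the carried value c
def gpCols (block : List String) (c : Int) : Int :=
  if block = [] then c else PySem.Str.len (block.getLastD "")

theorem gpPairs_nil : gpPairs [] = [] := rfl

theorem gpPairs_append_singleton (block : List String) (line : String) :
    gpPairs (block ++ [line]) =
      gpPairs block ++ (PySem.List.enumerate line.toList 0).filterMap
        (fun cc => if cc.2 = '#' then some (((block.length : Int)), cc.1) else none) := by
  simp [gpPairs, PySem.List.enumerate_append, PySem.List.enumerate_cons,
    PySem.List.enumerate_nil]

-- A's inner character loop = folding Set.add over the filterMap'd pairs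
theorem gpInner_eq_filterMap (l : List (Int × Char)) (r : Int) (pat : PySem.Set (Int × Int)) :
    l.foldl (fun pat cc => if cc.2 = '#' then PySem.Set.add pat (r, cc.1) else pat) pat
      = (l.filterMap (fun cc => if cc.2 = '#' then some (r, cc.1) else none)).foldl
          PySem.Set.add pat := by
  induction l generalizing pat with
  | nil => rfl
  | cons x xs ih =>
    by_cases h : x.2 = '#' <;> simp [h, ih]

theorem set_ofList_append (ys xs : List (Int × Int)) :
    PySem.Set.ofList (ys ++ xs) = xs.foldl PySem.Set.add (PySem.Set.ofList ys) := by
  simp [PySem.Set.ofList_eq_foldl, List.foldl_append]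

-- the split fold only ever appends to the accumulated block list
theorem gpSplit_shift (ls : List String) (bs : List (List String)) (cur : List String) :
    ls.foldl gpSplitStep (bs, cur)
      = (bs ++ (ls.foldl gpSplitStep ([], cur)).1, (ls.foldl gpSplitStep ([], cur)).2) := by
  induction ls generalizing bs cur with
  | nil => simp
  | cons line ls ih =>
    by_cases h : line = ""
    · subst h
      simp only [List.foldl_cons, gpSplitStep, reduceIte, List.nil_append]
      rw [ih (bs ++ [cur]) [], ih [cur] []]
      simp
    · simp only [List.foldl_cons, gpSplitStep, if_neg h]
      exact ih bs (cur ++ [line])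

theorem gpCols_nil (c : Int) : gpCols [] c = c := rfl

theorem str_len_lt_one_iff (s : String) : PySem.Str.len s < 1 ↔ s = "" := by
  rw [PySem.Str.len_eq]
  constructor
  · intro h
    have hnil : s.toList = [] := List.eq_nil_of_length_eq_zero (by omega)
    have := congrArg String.ofList hnil
    simpa using this
  · intro h; subst h; simp

-- main invariant: A's remaining fold, from a state describing the partially read block `cur`,
-- equals splitting the rest and processing (blocks so far handled in P / c)
theorem gp_main (ls : List String) (P : List ((List (Int × Int)) × Int × Int))
    (cur : List String) (c : Int) :
    (let st := ls.foldl gpStepA (P, PySem.Set.ofList (gpPairs cur), (cur.length : Int), gpCols cur c)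
     st.1 ++ [(st.2.1, st.2.2.1, st.2.2.2)])
    = (let sp := ls.foldl gpSplitStep ([], cur)
       ((sp.1 ++ [sp.2]).foldl gpProcStep (P, c)).1) := by
  induction ls generalizing P cur c with
  | nil =>
    simp [gpProcStep, gpCols]
  | cons line ls ih =>
    by_cases h : line = ""
    · -- blank line: A closes the block; B's split closes it too
      subst h
      have hlt : PySem.Str.len "" < 1 := (str_len_lt_one_iff "").mpr rfl
      have hA := ih (P ++ [(PySem.Set.ofList (gpPairs cur), (cur.length : Int), gpCols cur c)])
        [] (gpCols cur c)
      simp only [gpPairs_nil, List.length_nil, Nat.cast_zero, gpCols_nil] at hA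
      rw [show (PySem.Set.ofList ([] : List (Int × Int))) = PySem.Set.empty from rfl] at hA
      simp only [List.foldl_cons, gpStepA, gpSplitStep, reduceIte, List.nil_append]
      rw [if_pos hlt, hA, gpSplit_shift ls [cur] []]
      simp [gpProcStep, gpCols]
    · -- non-blank line: A extends the block; B's split appends the line to `cur`
      have hlt : ¬ PySem.Str.len line < 1 := fun hc => h ((str_len_lt_one_iff line).mp hc)
      simp only [List.foldl_cons, gpStepA, if_neg hlt, gpSplitStep, if_neg h]
      have hpat : (PySem.List.enumerate line.toList 0).foldl
          (fun pat cc => if cc.2 = '#' then PySem.Set.add pat ((cur.length : Int), cc.1) else pat)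
          (PySem.Set.ofList (gpPairs cur))
          = PySem.Set.ofList (gpPairs (cur ++ [line])) := by
        rw [gpInner_eq_filterMap, gpPairs_append_singleton, set_ofList_append]
      have hrow : ((cur.length : Int) + 1) = (((cur ++ [line]).length : Nat) : Int) := by
        simp
      have hcols : PySem.Str.len line = gpCols (cur ++ [line]) c := by
        simp [gpCols]
      rw [hpat, hrow, hcols]
      exact ih P (cur ++ [line]) c

-- ===== VERDICT (by name: the statement is the Claim_ definition above) =====
theorem get_patterns_spec : Claim_equal_get_patterns := by
  intro ls _ _
  unfold Spec_get_patterns get_patterns get_patterns_alt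
  have := gp_main ls [] [] (PySem.Str.len (ls.headD ""))
  simpa [gpPairs_nil, gpCols] using this
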